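-- pv_equiv track=rewrite | github.com/abc5588/jumpserver | apps/assets/migrations/0060_node_full_value.py | get_node_ancestor_keys
-- ===== SOURCE A (Python) =====
-- def get_node_ancestor_keys(key, with_self=False):
--     parent_keys = []
--     key_list = key.split(":")
--     if not with_self:
--         key_list.pop()
--     for i in range(len(key_list)):
--         parent_keys.append(":".join(key_list))
--         key_list.pop()
--     return parent_keys
-- ===== SOURCE B (Python) =====
-- def get_node_ancestor_keys(key, with_self=False):
--     keys = [key] if with_self else []
--     idx = key.rfind(":")
--     while idx != -1:
--         key = key[:idx]
--         keys.append(key)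
--         idx = key.rfind(":")
--     return keys
-- ===== Notes on version B (the rewrite author's own statement) =====
-- stated objective: idiomatic
-- what changed: B never splits the key into a list of segments nor re-joins them: it works on the string itself, repeatedly truncating at the last ':' found by rfind, so each ancestor key is produced by one slice instead of a join over a shrinking segment list.
import Mathlib
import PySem

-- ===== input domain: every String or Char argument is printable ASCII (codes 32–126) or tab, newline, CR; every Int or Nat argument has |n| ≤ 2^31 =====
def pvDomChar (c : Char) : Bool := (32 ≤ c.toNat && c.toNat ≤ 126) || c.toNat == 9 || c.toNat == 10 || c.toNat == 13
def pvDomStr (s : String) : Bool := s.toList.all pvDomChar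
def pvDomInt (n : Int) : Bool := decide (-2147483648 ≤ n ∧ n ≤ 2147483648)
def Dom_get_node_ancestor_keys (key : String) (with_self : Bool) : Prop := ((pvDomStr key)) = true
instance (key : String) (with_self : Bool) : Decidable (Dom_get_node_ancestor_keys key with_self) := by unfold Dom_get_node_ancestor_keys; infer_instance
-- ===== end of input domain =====

-- B builds the ancestor keys on the string itself (truncate at the last ':' via rfind) instead of
-- splitting into segments and re-joining them; objective: idiomatic, same asymptotic cost.


-- ===== PORT A =====
def get_node_ancestor_keys (key : String) (with_self : Bool) : List String :=
  let parent_keys : List String := []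
  -- key.split(":"): the separator ":" is non-empty, so Str.split? is always `some`
  let key_list : List String := (PySem.Str.split? key ":").getD []
  -- if not with_self: key_list.pop()  (the split list is non-empty; the popped value is discarded)
  let key_list := if with_self = false then key_list.dropLast else key_list
  -- for i in range(len(key_list)): parent_keys.append(":".join(key_list)); key_list.pop()
  ((PySem.List.pyRange 0 (key_list.length : Int) 1).foldl
      (fun (st : List String × List String) _ =>
        (st.1 ++ [PySem.Str.join ":" st.2], st.2.dropLast))
      (parent_keys, key_list)).1

-- ===== PORT B =====
-- termination helper for the while loop: any non-(-1) result of rfind is a valid index into s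
theorem pv_rfind_go_bound (s : List Char) :
    ∀ k, PySem.Chars.rfind.go s [':'] k = -1 ∨
      ∃ n : Nat, PySem.Chars.rfind.go s [':'] k = (n : Int) ∧ n < s.length := by
  intro k
  induction k with
  | zero =>
    by_cases h : [':'].isPrefixOf s = true
    · right
      refine ⟨0, by simp [PySem.Chars.rfind.go, h], ?_⟩
      have : [':'] <+: s := List.isPrefixOf_iff_prefix.mp h
      have := this.length_le
      simpa using Nat.lt_of_lt_of_le (by norm_num) this
    · left; simp [PySem.Chars.rfind.go, h]
  | succ j ih =>
    by_cases h : [':'].isPrefixOf (s.drop (j + 1)) = true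
    · right
      refine ⟨j + 1, by simp [PySem.Chars.rfind.go, h], ?_⟩
      have hpre : [':'] <+: s.drop (j + 1) := List.isPrefixOf_iff_prefix.mp h
      have h1 : 1 ≤ (s.drop (j + 1)).length := by simpa using hpre.length_le
      have : (s.drop (j + 1)).length = s.length - (j + 1) := by simp
      omega
    · have : PySem.Chars.rfind.go s [':'] (j + 1) = PySem.Chars.rfind.go s [':'] j := by
        simp [PySem.Chars.rfind.go, h]
      rw [this]; exact ih

theorem pv_rfind_bound (key : String) (h : PySem.Str.rfind key ":" ≠ -1) :
    ∃ n : Nat, PySem.Str.rfind key ":" = (n : Int) ∧ n < key.toList.length := by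
  have heq : PySem.Str.rfind key ":" = PySem.Chars.rfind key.toList [':'] := by
    simpa using PySem.Str.rfind_eq key ":"
  rcases pv_rfind_go_bound key.toList key.toList.length with h' | h'
  · exact absurd (by rw [heq]; exact h') h
  · exact ⟨h'.choose, by rw [heq]; exact h'.choose_spec.1, h'.choose_spec.2⟩

-- while idx != -1: key = key[:idx]; keys.append(key); idx = key.rfind(":")
def pvStripLoop (key : String) (keys : List String) : List String :=
  let idx := PySem.Str.rfind key ":"
  if h : idx = -1 then keys
  else
    let key' := PySem.Str.slice key none (some idx)
    pvStripLoop key' (keys ++ [key'])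
termination_by key.toList.length
decreasing_by
  obtain ⟨n, hn, hlt⟩ := pv_rfind_bound key h
  simp only [PySem.Str.toList_slice, hn, PySem.Chars.slice]
  rw [PySem.List.slice_to_natCast, List.length_take]
  omega

def get_node_ancestor_keys_alt (key : String) (with_self : Bool) : List String :=
  pvStripLoop key (if with_self then [key] else [])

-- ===== PRECONDITION & SPEC =====
def Spec_get_node_ancestor_keys (key : String) (with_self : Bool) (out : List String) : Prop := out = get_node_ancestor_keys_alt key with_self
instance (key : String) (with_self : Bool) (out : List String) : Decidable (Spec_get_node_ancestor_keys key with_self out) := by unfold Spec_get_node_ancestor_keys; infer_instance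

-- ===== CLAIM (what is proved, stated in full; the proofs are below) =====
def Claim_equal_get_node_ancestor_keys : Prop := ∀ (key : String) (with_self : Bool), Dom_get_node_ancestor_keys key with_self → Spec_get_node_ancestor_keys key with_self (get_node_ancestor_keys key with_self)

-- ===== LEMMAS AND PROOFS =====

-- prepend p to the head segment (the accumulator shape of splitOn.go)
def pvConsH (p : List Char) : List (List Char) → List (List Char)
  | [] => [p]
  | h :: t => (p ++ h) :: t

-- reference single-char split, structural
def pvSplit : List Char → List (List Char)
  | [] => [[]]
  | c :: rest => if c = ':' then [] :: pvSplit rest else pvConsH [c] (pvSplit rest)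

theorem pvSplit_ne_nil (cs : List Char) : pvSplit cs ≠ [] := by
  cases cs with
  | nil => simp [pvSplit]
  | cons c rest =>
    simp only [pvSplit]
    split
    · simp
    · cases h : pvSplit rest <;> simp [pvConsH]

theorem pv_go_spec : ∀ (fuel : Nat) (l cur : List Char) (accs : List (List Char)),
    l.length < fuel →
    PySem.Chars.splitOn.go [':'] fuel l cur accs =
      accs.reverse ++ pvConsH cur.reverse (pvSplit l) := by
  intro fuel
  induction fuel with
  | zero => intro l cur accs h; omega
  | succ f ih =>
    intro l cur accs h
    cases l with
    | nil =>
      simp [PySem.Chars.splitOn.go, pvSplit, pvConsH]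
    | cons c rest =>
      by_cases hc : c = ':'
      · subst hc
        rw [show PySem.Chars.splitOn.go [':'] (f+1) (':'::rest) cur accs
            = PySem.Chars.splitOn.go [':'] f rest [] (cur.reverse :: accs) by
          simp [PySem.Chars.splitOn.go, List.isPrefixOf]]
        rw [ih rest [] (cur.reverse :: accs) (by simp at h; omega)]
        obtain ⟨hh, tt, hsp⟩ := List.exists_cons_of_ne_nil (pvSplit_ne_nil rest)
        simp [pvSplit, pvConsH, hsp]
      · rw [show PySem.Chars.splitOn.go [':'] (f+1) (c::rest) cur accs
            = PySem.Chars.splitOn.go [':'] f rest (c :: cur) accs by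
          simp [PySem.Chars.splitOn.go, List.isPrefixOf, Ne.symm hc]]
        rw [ih rest (c :: cur) accs (by simp at h; omega)]
        obtain ⟨hh, tt, hsp⟩ := List.exists_cons_of_ne_nil (pvSplit_ne_nil rest)
        simp [pvSplit, pvConsH, hsp, hc]


theorem pv_splitOn_eq (cs : List Char) :
    PySem.Chars.splitOn cs [':'] = pvSplit cs := by
  rw [show PySem.Chars.splitOn cs [':'] = PySem.Chars.splitOn.go [':'] (cs.length+1) cs [] [] from rfl]
  rw [pv_go_spec (cs.length+1) cs [] [] (by omega)]
  obtain ⟨hh, tt, hsp⟩ := List.exists_cons_of_ne_nil (pvSplit_ne_nil cs)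
  simp [pvConsH, hsp]


theorem pv_split_no_colon (ys : List Char) (h : ':' ∉ ys) : pvSplit ys = [ys] := by
  induction ys with
  | nil => simp [pvSplit]
  | cons c rest ih =>
    have hc : ¬ c = ':' := by intro e; exact h (by simp [e])
    have hr : ':' ∉ rest := fun m => h (by simp [m])
    simp [pvSplit, hc, ih hr, pvConsH]


theorem pv_split_append (xs ys : List Char) :
    pvSplit (xs ++ ':' :: ys) = pvSplit xs ++ pvSplit ys := by
  induction xs with
  | nil => simp [pvSplit]
  | cons c xs ih =>
    by_cases hc : c = ':'
    · subst hc
      simp [pvSplit, ih]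
    · simp only [List.cons_append, pvSplit, if_neg hc, ih]
      obtain ⟨hh, tt, hsp⟩ := List.exists_cons_of_ne_nil (pvSplit_ne_nil xs)
      simp [hsp, pvConsH]


theorem pv_join_cons (c : Char) (hh : List Char) (tt : List (List Char)) :
    PySem.Chars.join [':'] ((c :: hh) :: tt) = c :: PySem.Chars.join [':'] (hh :: tt) := by
  cases tt with
  | nil => simp [PySem.Chars.join_singleton]
  | cons y ts => simp [PySem.Chars.join_cons_cons]

theorem pv_colon_toList : (":" : String).toList = [':'] := by decide

theorem pv_join_split (cs : List Char) :
    PySem.Chars.join [':'] (pvSplit cs) = cs := by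
  induction cs with
  | nil => simp [pvSplit, PySem.Chars.join_singleton]
  | cons c rest ih =>
    obtain ⟨hh, tt, hsp⟩ := List.exists_cons_of_ne_nil (pvSplit_ne_nil rest)
    rw [hsp] at ih
    by_cases hc : c = ':'
    · subst hc
      rw [show pvSplit (':' :: rest) = [] :: pvSplit rest from by simp [pvSplit], hsp,
        PySem.Chars.join_cons_cons, ih]
      simp
    · rw [show pvSplit (c :: rest) = pvConsH [c] (pvSplit rest) from by simp [pvSplit, hc], hsp]
      show PySem.Chars.join [':'] ((c :: hh) :: tt) = c :: rest
      rw [pv_join_cons, ih]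


theorem pv_not_prefix_of_not_mem (s : List Char) (h : ':' ∉ s) (j : Nat) :
    [':'].isPrefixOf (s.drop j) = false := by
  cases hd : s.drop j with
  | nil => simp [List.isPrefixOf]
  | cons a t =>
    have ha : a ∈ s := (List.drop_sublist j s).subset (by rw [hd]; simp)
    have hne : ¬ a = ':' := fun e => h (e ▸ ha)
    simp [List.isPrefixOf, Ne.symm hne]


theorem pv_rfind_go_neg (s : List Char) (h : ':' ∉ s) :
    ∀ k, PySem.Chars.rfind.go s [':'] k = -1 := by
  intro k
  induction k with
  | zero =>
    have h0 := pv_not_prefix_of_not_mem s h 0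
    rw [List.drop_zero] at h0
    simp [PySem.Chars.rfind.go, h0]
  | succ j ih =>
    simp [PySem.Chars.rfind.go, pv_not_prefix_of_not_mem s h (j+1), ih]


theorem pv_rfind_neg (s : List Char) (h : ':' ∉ s) :
    PySem.Chars.rfind s [':'] = -1 := by
  exact pv_rfind_go_neg s h s.length


theorem pv_rfind_go_pos (xs ys : List Char) (h : ':' ∉ ys) :
    ∀ k, xs.length ≤ k →
      PySem.Chars.rfind.go (xs ++ ':' :: ys) [':'] k = (xs.length : Int) := by
  intro k
  induction k with
  | zero =>
    intro hk
    have hxs : xs = [] := List.eq_nil_of_length_eq_zero (Nat.le_zero.mp hk)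
    subst hxs
    simp [PySem.Chars.rfind.go, List.isPrefixOf]
  | succ j ih =>
    intro hk
    by_cases he : xs.length = j + 1
    · have hdrop : (xs ++ ':' :: ys).drop (j + 1) = ':' :: ys := by
        rw [← he]; exact List.drop_left
      rw [show PySem.Chars.rfind.go (xs ++ ':' :: ys) [':'] (j+1) = ((j+1 : Nat) : Int) from by
        simp [PySem.Chars.rfind.go, hdrop, List.isPrefixOf]]
      exact_mod_cast he.symm
    · have hle : xs.length ≤ j := by omega
      have hdrop : (xs ++ ':' :: ys).drop (j + 1) = ys.drop (j - xs.length) := by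
        rw [List.drop_append, List.drop_eq_nil_of_le (by omega)]
        rw [show j + 1 - xs.length = (j - xs.length) + 1 from by omega]
        simp
      have hpf : [':'].isPrefixOf ((xs ++ ':' :: ys).drop (j + 1)) = false := by
        rw [hdrop]; exact pv_not_prefix_of_not_mem ys h (j - xs.length)
      rw [show PySem.Chars.rfind.go (xs ++ ':' :: ys) [':'] (j+1)
          = PySem.Chars.rfind.go (xs ++ ':' :: ys) [':'] j from by
        simp [PySem.Chars.rfind.go, hpf]]
      exact ih hle


theorem pv_rfind_pos (xs ys : List Char) (h : ':' ∉ ys) :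
    PySem.Chars.rfind (xs ++ ':' :: ys) [':'] = (xs.length : Int) := by
  exact pv_rfind_go_pos xs ys h (xs ++ ':' :: ys).length (by simp)


theorem pv_last_occ {c : Char} {l : List Char} (h : c ∈ l) :
    ∃ xs ys, l = xs ++ c :: ys ∧ c ∉ ys := by
  induction l with
  | nil => cases h
  | cons a t ih =>
    by_cases ht : c ∈ t
    · obtain ⟨xs, ys, he, hy⟩ := ih ht
      exact ⟨a :: xs, ys, by rw [List.cons_append, he], hy⟩
    · have hca : c = a := by
        rcases List.mem_cons.mp h with h1 | h2
        · exact h1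
        · exact absurd h2 ht
      exact ⟨[], t, by rw [hca, List.nil_append], ht⟩


-- longest-to-shortest chain of joins, chars level
def pvChain (l : List (List Char)) : List (List Char) :=
  match l with
  | [] => []
  | h :: t => PySem.Chars.join [':'] (h :: t) :: pvChain ((h :: t).dropLast)
termination_by l.length
decreasing_by simp

-- same chain at string level (A's loop semantics)
def pvChainS (l : List String) : List String :=
  match l with
  | [] => []
  | h :: t => PySem.Str.join ":" (h :: t) :: pvChainS ((h :: t).dropLast)
termination_by l.length
decreasing_by simp

theorem pvChain_cons (h : List Char) (t : List (List Char)) :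
    pvChain (h :: t) = PySem.Chars.join [':'] (h :: t) :: pvChain ((h :: t).dropLast) := by
  rw [pvChain]

theorem pvChainS_cons (h : String) (t : List String) :
    pvChainS (h :: t) = PySem.Str.join ":" (h :: t) :: pvChainS ((h :: t).dropLast) := by
  rw [pvChainS]

theorem pv_fold_chain : ∀ (r : List Int) (l acc : List String),
    r.length = l.length →
    r.foldl (fun (st : List String × List String) _ =>
        (st.1 ++ [PySem.Str.join ":" st.2], st.2.dropLast)) (acc, l)
      = (acc ++ pvChainS l, []) := by
  intro r
  induction r with
  | nil =>
    intro l acc h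
    have hl : l = [] := List.eq_nil_of_length_eq_zero (by simpa using h.symm)
    simp [hl, pvChainS]
  | cons x rs ih =>
    intro l acc h
    cases l with
    | nil => simp at h
    | cons hd tl =>
      simp only [List.foldl_cons]
      rw [ih ((hd :: tl).dropLast) (acc ++ [PySem.Str.join ":" (hd :: tl)])
        (by simp at h ⊢; omega)]
      rw [pvChainS_cons]
      simp


theorem pv_chainS_map : ∀ (ps : List (List Char)),
    pvChainS (ps.map String.ofList) = (pvChain ps).map String.ofList := by
  have H : ∀ (n : Nat) (ps : List (List Char)), ps.length ≤ n →
      pvChainS (ps.map String.ofList) = (pvChain ps).map String.ofList := by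
    intro n
    induction n with
    | zero =>
      intro ps hp
      have : ps = [] := List.eq_nil_of_length_eq_zero (Nat.le_zero.mp hp)
      simp [this, pvChainS, pvChain]
    | succ n ih =>
      intro ps hp
      cases ps with
      | nil => simp [pvChainS, pvChain]
      | cons hd tl =>
        rw [List.map_cons, pvChainS_cons, pvChain_cons, List.map_cons]
        congr 1
        · rw [PySem.Str.join]
          congr 1
          simp [List.map_map, Function.comp_def, pv_colon_toList]
        · rw [show (String.ofList hd :: tl.map String.ofList).dropLast
              = ((hd :: tl).dropLast).map String.ofList from by
            rw [← List.map_cons, List.map_dropLast]]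
          exact ih _ (by simp at hp ⊢; omega)
  exact fun ps => H ps.length ps le_rfl


theorem pv_A_char (key : String) (with_self : Bool) :
    get_node_ancestor_keys key with_self =
      (pvChain (if with_self then pvSplit key.toList else (pvSplit key.toList).dropLast)).map
        String.ofList := by
  have hsplit : (PySem.Str.split? key ":").getD [] = (pvSplit key.toList).map String.ofList := by
    rw [PySem.Str.split?, PySem.Chars.split?]
    rw [pv_colon_toList]
    simp [pv_splitOn_eq]
  show (((PySem.List.pyRange 0 _ 1).foldl _ (_, _)).1 : List String) = _
  rw [hsplit]
  cases with_self with
  | false =>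
    simp only [Bool.false_eq_true, if_false]
    rw [pv_fold_chain _ _ _ (by simp [PySem.List.length_pyRange_one])]
    simp [← List.map_dropLast, pv_chainS_map]
  | true =>
    simp only [if_neg (by simp : ¬ (true = false))]
    rw [pv_fold_chain _ _ _ (by simp [PySem.List.length_pyRange_one])]
    simp [pv_chainS_map]


theorem pv_strip_stop (key : String) (acc : List String) (h : ':' ∉ key.toList) :
    pvStripLoop key acc = acc := by
  have hneg : PySem.Chars.rfind key.toList [':'] = -1 := pv_rfind_neg key.toList h
  rw [pvStripLoop.eq_def]
  simp [hneg]

theorem pv_strip_spec : ∀ (n : Nat) (key : String), key.toList.length ≤ n → ∀ (acc : List String),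
    pvStripLoop key acc =
      acc ++ (pvChain (pvSplit key.toList).dropLast).map String.ofList := by
  intro n
  induction n with
  | zero =>
    intro key hk acc
    have hnil : key.toList = [] := List.eq_nil_of_length_eq_zero (Nat.le_zero.mp hk)
    rw [pv_strip_stop key acc (by rw [hnil]; exact List.not_mem_nil)]
    rw [hnil]
    simp [pvSplit, pvChain]
  | succ n ih =>
    intro key hk acc
    by_cases hmem : ':' ∈ key.toList
    · obtain ⟨xs, ys, hcs, hy⟩ := pv_last_occ hmem
      have hidx : PySem.Str.rfind key ":" = (xs.length : Int) := by
        rw [PySem.Str.rfind_eq, pv_colon_toList, hcs]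
        exact pv_rfind_pos xs ys hy
      have hne : PySem.Str.rfind key ":" ≠ -1 := by
        rw [hidx]; intro e
        have := Int.natCast_nonneg xs.length
        omega
      have hkey' : PySem.Str.slice key none (some (PySem.Str.rfind key ":")) = String.ofList xs := by
        apply String.toList_inj.mp
        rw [PySem.Str.toList_slice, String.toList_ofList, hidx]
        simp only [PySem.Chars.slice]
        rw [PySem.List.slice_to_natCast, hcs]
        exact List.take_left
      rw [pvStripLoop.eq_def]
      simp only []
      rw [dif_neg hne, hkey']
      rw [ih (String.ofList xs)
        (by rw [String.toList_ofList]
            have : key.toList.length = xs.length + 1 + ys.length := by rw [hcs]; simp; omega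
            omega)
        (acc ++ [String.ofList xs])]
      rw [String.toList_ofList, hcs, pv_split_append, pv_split_no_colon ys hy,
        List.dropLast_concat]
      obtain ⟨hh, tt, hsp⟩ := List.exists_cons_of_ne_nil (pvSplit_ne_nil xs)
      rw [hsp, pvChain_cons, ← hsp, pv_join_split]
      simp
    · rw [pv_strip_stop key acc hmem]
      rw [pv_split_no_colon _ hmem]
      simp [pvChain]


theorem pv_B_char (key : String) (with_self : Bool) :
    get_node_ancestor_keys_alt key with_self =
      (if with_self then [key] else []) ++
        (pvChain (pvSplit key.toList).dropLast).map String.ofList := by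
  show pvStripLoop key _ = _
  exact pv_strip_spec key.toList.length key le_rfl _


-- ===== VERDICT (by name: the statement is the Claim_ definition above) =====
theorem get_node_ancestor_keys_spec : Claim_equal_get_node_ancestor_keys := by
  intro key with_self _
  unfold Spec_get_node_ancestor_keys
  rw [pv_A_char, pv_B_char]
  cases with_self with
  | false => simp
  | true =>
    obtain ⟨h, t, hht⟩ : ∃ h t, pvSplit key.toList = h :: t := by
      cases hs : pvSplit key.toList with
      | nil => exact absurd hs (pvSplit_ne_nil _)
      | cons h t => exact ⟨h, t, rfl⟩
    have hjoin : PySem.Chars.join [':'] (pvSplit key.toList) = key.toList := pv_join_split _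
    rw [if_pos rfl, if_pos rfl, hht, pvChain]
    rw [hht] at hjoin
    rw [hjoin]
    simp
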